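-- pv_equiv track=rewrite | github.com/willempoort/netmonitor | mcp_server/shared_tools.py | _map_to_kill_chain_stage
-- ===== SOURCE A (Python) =====
-- def _map_to_kill_chain_stage(threat_type: str) -> str:
--     """Map threat type to cyber kill chain stage"""
--     if not threat_type:
--         return None
--
--     threat_type_lower = threat_type.lower()
--
--     # Reconnaissance
--     if any(x in threat_type_lower for x in ['scan', 'reconnaissance', 'discovery', 'enumeration']):
--         return 'reconnaissance'
--
--     # Weaponization (typically not detected in network traffic)
--
--     # Delivery
--     if any(x in threat_type_lower for x in ['phishing', 'malware', 'dropper', 'download']):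
--         return 'delivery'
--
--     # Exploitation
--     if any(x in threat_type_lower for x in ['exploit', 'injection', 'overflow', 'rce', 'vulnerability']):
--         return 'exploitation'
--
--     # Installation
--     if any(x in threat_type_lower for x in ['backdoor', 'webshell', 'persistence', 'install']):
--         return 'installation'
--
--     # Command & Control
--     if any(x in threat_type_lower for x in ['c2', 'beacon', 'command', 'control', 'tunnel', 'dns_tunnel', 'tor']):
--         return 'command_and_control'
--
--     # Actions on Objectives
--     if any(x in threat_type_lower for x in ['exfil', 'lateral', 'privilege', 'credential', 'ransom', 'encrypt', 'data_theft']):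
--         return 'actions_on_objectives'
--
--     # General threat indicators
--     if any(x in threat_type_lower for x in ['brute', 'attack', 'suspicious', 'anomaly', 'risk']):
--         return 'reconnaissance'  # Default to early stage
--
--     return None
-- ===== SOURCE B (Python) =====
-- _STAGE_NAMES = ['reconnaissance', 'delivery', 'exploitation', 'installation',
--                 'command_and_control', 'actions_on_objectives', 'reconnaissance']
--
-- # keyword -> index of the earliest kill-chain row it belongs to
-- _KEYWORDS = {
--     'scan': 0, 'reconnaissance': 0, 'discovery': 0, 'enumeration': 0,
--     'phishing': 1, 'malware': 1, 'dropper': 1, 'download': 1,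
--     'exploit': 2, 'injection': 2, 'overflow': 2, 'rce': 2, 'vulnerability': 2,
--     'backdoor': 3, 'webshell': 3, 'persistence': 3, 'install': 3,
--     'c2': 4, 'beacon': 4, 'command': 4, 'control': 4, 'tunnel': 4,
--     'dns_tunnel': 4, 'tor': 4,
--     'exfil': 5, 'lateral': 5, 'privilege': 5, 'credential': 5, 'ransom': 5,
--     'encrypt': 5, 'data_theft': 5,
--     'brute': 6, 'attack': 6, 'suspicious': 6, 'anomaly': 6, 'risk': 6,
-- }
--
-- _LENGTHS = sorted({len(k) for k in _KEYWORDS})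
--
--
-- def _map_to_kill_chain_stage(threat_type: str) -> str:
--     if not threat_type:
--         return None
--     s = threat_type.lower()
--     n = len(s)
--     best = None
--     # single left-to-right scan: every substring whose length is a keyword
--     # length is looked up in the hash index; keep the smallest row index
--     for i in range(n):
--         for L in _LENGTHS:
--             if i + L > n:
--                 break
--             p = _KEYWORDS.get(s[i:i + L])
--             if p is not None and (best is None or p < best):
--                 best = p
--     return None if best is None else _STAGE_NAMES[best]
-- ===== Notes on version B (the rewrite author's own statement) =====
-- stated objective: alternative
-- what changed: Instead of testing each keyword for containment row by row, B builds a keyword->row hash index plus the set of keyword lengths, scans the lowered input once taking every substring of a keyword length, looks it up in the index, and keeps the minimal matching row index.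
import Mathlib
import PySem

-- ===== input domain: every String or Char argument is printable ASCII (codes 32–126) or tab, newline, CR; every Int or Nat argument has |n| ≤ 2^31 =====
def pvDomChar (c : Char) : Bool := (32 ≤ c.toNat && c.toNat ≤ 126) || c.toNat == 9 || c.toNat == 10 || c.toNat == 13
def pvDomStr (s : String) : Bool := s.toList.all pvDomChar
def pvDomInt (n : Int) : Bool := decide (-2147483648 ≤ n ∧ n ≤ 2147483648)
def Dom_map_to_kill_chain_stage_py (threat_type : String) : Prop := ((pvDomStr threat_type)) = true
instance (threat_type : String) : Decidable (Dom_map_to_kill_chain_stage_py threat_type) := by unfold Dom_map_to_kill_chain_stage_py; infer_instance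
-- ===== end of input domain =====

-- B replaces the per-keyword containment cascade by a hash index over the keywords and one
-- left-to-right scan of the input's substrings, keeping the minimal matching row index (alternative algorithm, same result).

-- ===== PORT A =====
def map_to_kill_chain_stage_py (threat_type : String) : Option String :=
  if threat_type = "" then none
  else
    let threat_type_lower := PySem.Str.lower threat_type
    if (["scan", "reconnaissance", "discovery", "enumeration"].any fun x => PySem.Str.isIn x threat_type_lower) then
      some "reconnaissance"
    else if (["phishing", "malware", "dropper", "download"].any fun x => PySem.Str.isIn x threat_type_lower) then
      some "delivery"
    else if (["exploit", "injection", "overflow", "rce", "vulnerability"].any fun x => PySem.Str.isIn x threat_type_lower) then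
      some "exploitation"
    else if (["backdoor", "webshell", "persistence", "install"].any fun x => PySem.Str.isIn x threat_type_lower) then
      some "installation"
    else if (["c2", "beacon", "command", "control", "tunnel", "dns_tunnel", "tor"].any fun x => PySem.Str.isIn x threat_type_lower) then
      some "command_and_control"
    else if (["exfil", "lateral", "privilege", "credential", "ransom", "encrypt", "data_theft"].any fun x => PySem.Str.isIn x threat_type_lower) then
      some "actions_on_objectives"
    else if (["brute", "attack", "suspicious", "anomaly", "risk"].any fun x => PySem.Str.isIn x threat_type_lower) then
      some "reconnaissance"
    else none

-- ===== PORT B =====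
def pvStageNames : List String :=
  ["reconnaissance", "delivery", "exploitation", "installation",
   "command_and_control", "actions_on_objectives", "reconnaissance"]

-- the dict literal _KEYWORDS, as its ordered (key, value) pairs
def pvKWPairs : List (String × Int) :=
  [("scan", 0), ("reconnaissance", 0), ("discovery", 0), ("enumeration", 0),
   ("phishing", 1), ("malware", 1), ("dropper", 1), ("download", 1),
   ("exploit", 2), ("injection", 2), ("overflow", 2), ("rce", 2), ("vulnerability", 2),
   ("backdoor", 3), ("webshell", 3), ("persistence", 3), ("install", 3),
   ("c2", 4), ("beacon", 4), ("command", 4), ("control", 4), ("tunnel", 4),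
   ("dns_tunnel", 4), ("tor", 4),
   ("exfil", 5), ("lateral", 5), ("privilege", 5), ("credential", 5), ("ransom", 5),
   ("encrypt", 5), ("data_theft", 5),
   ("brute", 6), ("attack", 6), ("suspicious", 6), ("anomaly", 6), ("risk", 6)]

def pvKW : PySem.Dict String Int := PySem.Dict.ofList pvKWPairs

-- _LENGTHS = sorted({len(k) for k in _KEYWORDS})
def pvLengths : List Int :=
  PySem.List.sorted (PySem.Set.ofList (pvKWPairs.map (fun e => PySem.Str.len e.1))) (fun x => x)

-- 'if p is not None and (best is None or p < best): best = p'
def pvUpd (best : Option Int) (p? : Option Int) : Option Int :=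
  match p? with
  | none => best
  | some p =>
    match best with
    | none => some p
    | some b => if p < b then some p else some b

-- the inner 'for L in _LENGTHS: if i + L > n: break; …' loop
def pvInner (s : String) (n i : Int) : List Int → Option Int → Option Int
  | [], best => best
  | L :: rest, best =>
    if n < i + L then best
    else pvInner s n i rest (pvUpd best (pvKW.get? (PySem.Str.slice s (some i) (some (i + L)))))

-- the outer 'for i in range(n)' loop
def pvScanB (s : String) (n : Int) : Option Int :=
  (PySem.List.pyRange 0 n 1).foldl (fun best i => pvInner s n i pvLengths best) none

def map_to_kill_chain_stage_py_alt (threat_type : String) : Option String :=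
  if threat_type = "" then none
  else
    let s := PySem.Str.lower threat_type
    let n := PySem.Str.len s
    match pvScanB s n with
    | none => none
    | some p => some (PySem.List.pyGetD pvStageNames p "")  -- _STAGE_NAMES[best]; 0 ≤ best < 7 always, so the index is in range

-- ===== PRECONDITION & SPEC =====
def Spec_map_to_kill_chain_stage_py (threat_type : String) (out : Option String) : Prop := out = map_to_kill_chain_stage_py_alt threat_type
instance (threat_type : String) (out : Option String) : Decidable (Spec_map_to_kill_chain_stage_py threat_type out) := by unfold Spec_map_to_kill_chain_stage_py; infer_instance

-- ===== CLAIM (what is proved, stated in full; the proofs are below) =====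
def Claim_equal_map_to_kill_chain_stage_py : Prop := ∀ (threat_type : String), Dom_map_to_kill_chain_stage_py threat_type → Spec_map_to_kill_chain_stage_py threat_type (map_to_kill_chain_stage_py threat_type)

-- ===== LEMMAS AND PROOFS =====

-- A's seven keyword rows, by index
def pvRow : Nat → List String
  | 0 => ["scan", "reconnaissance", "discovery", "enumeration"]
  | 1 => ["phishing", "malware", "dropper", "download"]
  | 2 => ["exploit", "injection", "overflow", "rce", "vulnerability"]
  | 3 => ["backdoor", "webshell", "persistence", "install"]
  | 4 => ["c2", "beacon", "command", "control", "tunnel", "dns_tunnel", "tor"]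
  | 5 => ["exfil", "lateral", "privilege", "credential", "ransom", "encrypt", "data_theft"]
  | 6 => ["brute", "attack", "suspicious", "anomaly", "risk"]
  | _ => []

def pvHit (j : Nat) (s : String) : Bool := (pvRow j).any (fun k => PySem.Str.isIn k s)

def pvFirstHit (s : String) : Option Int :=
  if pvHit 0 s then some 0
  else if pvHit 1 s then some 1
  else if pvHit 2 s then some 2
  else if pvHit 3 s then some 3
  else if pvHit 4 s then some 4
  else if pvHit 5 s then some 5
  else if pvHit 6 s then some 6
  else none

def pvCands (s : String) (n i : Int) : List Int :=
  (pvLengths.takeWhile (fun L => decide (i + L ≤ n))).filterMap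
    (fun L => pvKW.get? (PySem.Str.slice s (some i) (some (i + L))))

def pvCollected (s : String) (n : Int) : List Int :=
  (PySem.List.pyRange 0 n 1).flatMap (pvCands s n)

lemma pv_inner_eq (s : String) (n i : Int) (Ls : List Int) (best : Option Int) :
    pvInner s n i Ls best =
      ((Ls.takeWhile (fun L => decide (i + L ≤ n))).filterMap
        (fun L => pvKW.get? (PySem.Str.slice s (some i) (some (i + L))))).foldl
        (fun b p => pvUpd b (some p)) best := by
  induction Ls generalizing best with
  | nil => simp [pvInner]
  | cons L rest ih =>
    by_cases hc : n < i + L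
    · have : (decide (i + L ≤ n)) = false := by simp; omega
      simp [pvInner, hc, this]
    · have hd : (decide (i + L ≤ n)) = true := by simp; omega
      rw [pvInner, if_neg hc, List.takeWhile_cons, hd]
      cases hg : pvKW.get? (PySem.Str.slice s (some i) (some (i + L))) with
      | none => simp [hg, ih, pvUpd]
      | some p => simp [hg, ih]

lemma pv_scan_eq (s : String) (n : Int) :
    pvScanB s n = (pvCollected s n).foldl (fun b p => pvUpd b (some p)) none := by
  rw [pvScanB, pvCollected, List.foldl_flatMap]
  simp only [pv_inner_eq, pvCands]

lemma pv_fold_min_some (l : List Int) (a : Int) :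
    l.foldl (fun b p => pvUpd b (some p)) (some a) = some (l.foldl min a) := by
  induction l generalizing a with
  | nil => rfl
  | cons x xs ih =>
    have h : pvUpd (some a) (some x) = some (min a x) := by
      simp only [pvUpd, min_def]
      split_ifs <;> (first | rfl | omega)
    simp only [List.foldl_cons, h, ih]

lemma pv_fold_min (l : List Int) :
    l.foldl (fun b p => pvUpd b (some p)) none = l.min? := by
  cases l with
  | nil => rfl
  | cons x xs =>
    have h0 : pvUpd none (some x) = some x := rfl
    rw [List.foldl_cons, h0, pv_fold_min_some]
    rfl

lemma pv_get?_mem {l : List (String × Int)} {x : String} {v : Int}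
    (h : (PySem.Dict.mk l).get? x = some v) : (x, v) ∈ l := by
  induction l with
  | nil => simp [PySem.Dict.get?] at h
  | cons p rest ih =>
    obtain ⟨k0, v0⟩ := p
    rw [PySem.Dict.get?_mk_cons] at h
    by_cases he : k0 = x
    · subst he
      simp at h
      subst h
      exact List.mem_cons_self
    · have : (k0 == x) = false := by simp [he]
      rw [this] at h
      simp at h
      exact List.mem_cons_of_mem _ (ih h)

-- literal facts about the tables, established once by kernel computation
set_option maxRecDepth 40000 in
lemma pvKW_mk : pvKW = PySem.Dict.mk pvKWPairs := by decide
set_option maxRecDepth 40000 in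
lemma pvPairs_row : ∀ p ∈ pvKWPairs, 0 ≤ p.2 ∧ p.2 < 7 ∧ p.1 ∈ pvRow p.2.toNat := by decide
set_option maxRecDepth 40000 in
lemma pvRow_pairs : ∀ jn : Nat, jn < 7 → ∀ k ∈ pvRow jn, (k, (jn : Int)) ∈ pvKWPairs := by decide
set_option maxRecDepth 40000 in
lemma pvPairs_len : ∀ p ∈ pvKWPairs, ((p.1.toList.length : Nat) : Int) ∈ pvLengths := by decide
set_option maxRecDepth 40000 in
lemma pvPairs_get : ∀ p ∈ pvKWPairs, pvKW.get? p.1 = some p.2 := by decide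
set_option maxRecDepth 40000 in
lemma pvLengths_ge : ∀ L ∈ pvLengths, (2 : Int) ≤ L := by decide
set_option maxRecDepth 40000 in
lemma pvLengths_sorted : pvLengths.Pairwise (· ≤ ·) := by decide

lemma pv_mem_takeWhile_of_sorted {l : List Int} (hs : l.Pairwise (· ≤ ·)) {i n L : Int}
    (hL : L ∈ l) (h : i + L ≤ n) : L ∈ l.takeWhile (fun L => decide (i + L ≤ n)) := by
  induction l with
  | nil => simp at hL
  | cons a rest ih =>
    rcases List.pairwise_cons.mp hs with ⟨ha, hrest⟩
    rcases List.mem_cons.mp hL with rfl | hmem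
    · rw [List.takeWhile_cons, if_pos (by simp; omega)]
      exact List.mem_cons_self
    · have haL : a ≤ L := ha L hmem
      rw [List.takeWhile_cons, if_pos (by simp; omega)]
      exact List.mem_cons_of_mem _ (ih hrest hmem)

lemma pv_slice_toList (s : String) (i L : Int) (hi : 0 ≤ i) (hL : 0 ≤ L) :
    (PySem.Str.slice s (some i) (some (i + L))).toList =
      (s.toList.drop i.toNat).take L.toNat := by
  rw [PySem.Str.toList_slice, PySem.Chars.slice_eq_listSlice,
    PySem.List.slice_toNat _ hi (by omega)]
  congr 1
  omega

set_option maxRecDepth 40000 in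
lemma pv_mem_collected (s : String) (j : Int) :
    j ∈ pvCollected s (PySem.Str.len s) ↔ 0 ≤ j ∧ j < 7 ∧ pvHit j.toNat s = true := by
  have hn : PySem.Str.len s = (s.toList.length : Int) := by
    simp [PySem.Str.len_eq]
  constructor
  · intro hj
    obtain ⟨i, hi, hj⟩ := List.mem_flatMap.mp hj
    rw [PySem.List.mem_pyRange_one] at hi
    obtain ⟨L, hLmem, hget⟩ := List.mem_filterMap.mp hj
    have hLl : L ∈ pvLengths := (List.takeWhile_sublist _).subset hLmem
    have hL2 : (2 : Int) ≤ L := pvLengths_ge L hLl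
    -- the looked-up key is a keyword of row j.toNat and an infix of s
    rw [pvKW_mk] at hget
    have hp := pv_get?_mem hget
    have hr := pvPairs_row _ hp
    refine ⟨hr.1, hr.2.1, ?_⟩
    rw [pvHit, List.any_eq_true]
    refine ⟨_, hr.2.2, ?_⟩
    rw [PySem.Str.isIn_iff_infix]
    rw [pv_slice_toList s i L (by omega) (by omega)]
    exact ((List.take_prefix _ _).isInfix.trans (List.drop_suffix _ _).isInfix)
  · rintro ⟨h0, h7, hhit⟩
    obtain ⟨k, hk, hin⟩ := List.any_eq_true.mp hhit
    obtain ⟨pre, suf, hsplit⟩ := (PySem.Str.isIn_iff_infix k s).mp hin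
    have hkp : (k, j) ∈ pvKWPairs := by
      have := pvRow_pairs j.toNat (by omega) k hk
      rwa [Int.toNat_of_nonneg h0] at this
    have hLl : ((k.toList.length : Nat) : Int) ∈ pvLengths := pvPairs_len _ hkp
    have hL2 : (2 : Int) ≤ (k.toList.length : Int) := pvLengths_ge _ hLl
    have hlen : s.toList.length = pre.length + k.toList.length + suf.length := by
      rw [← hsplit]; simp; omega
    set i : Int := (pre.length : Int) with hidef
    set L : Int := (k.toList.length : Int) with hLdef
    apply List.mem_flatMap.mpr
    refine ⟨i, ?_, ?_⟩
    · rw [PySem.List.mem_pyRange_one, hn]; omega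
    · apply List.mem_filterMap.mpr
      refine ⟨L, ?_, ?_⟩
      · apply pv_mem_takeWhile_of_sorted pvLengths_sorted hLl
        rw [hn]; omega
      · have hslice : (PySem.Str.slice s (some i) (some (i + L))).toList = k.toList := by
          rw [pv_slice_toList s i L (by omega) (by omega)]
          have hd : s.toList.drop i.toNat = k.toList ++ suf := by
            rw [← hsplit]
            simp [hidef]
          rw [hd]
          simp [hLdef]
        have hkey : PySem.Str.slice s (some i) (some (i + L)) = k :=
          String.toList_inj.mp hslice
        rw [hkey]
        exact pvPairs_get _ hkp

lemma pv_min_collected (s : String) :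
    (pvCollected s (PySem.Str.len s)).min? = pvFirstHit s := by
  have hmem := pv_mem_collected s
  have bound : ∀ (m : Nat), (∀ jn : Nat, jn < m → pvHit jn s = false) →
      ∀ b ∈ pvCollected s (PySem.Str.len s), (m : Int) ≤ b := by
    intro m hfalse b hb
    obtain ⟨hb0, hb7, hbh⟩ := (hmem b).mp hb
    by_contra hlt
    rw [hfalse b.toNat (by omega)] at hbh
    exact Bool.false_ne_true hbh
  rw [pvFirstHit]
  by_cases h0 : pvHit 0 s = true
  · rw [if_pos h0, List.min?_eq_some_iff]
    exact ⟨(hmem 0).mpr ⟨by omega, by omega, h0⟩, fun b hb => ((hmem b).mp hb).1⟩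
  have h0f : pvHit 0 s = false := Bool.eq_false_iff.mpr h0
  by_cases h1 : pvHit 1 s = true
  · rw [if_neg h0, if_pos h1, List.min?_eq_some_iff]
    refine ⟨(hmem 1).mpr ⟨by omega, by omega, h1⟩, fun b hb => ?_⟩
    have := bound 1 (by intro jn hjn; interval_cases jn; exact h0f) b hb
    omega
  have h1f : pvHit 1 s = false := Bool.eq_false_iff.mpr h1
  by_cases h2 : pvHit 2 s = true
  · rw [if_neg h0, if_neg h1, if_pos h2, List.min?_eq_some_iff]
    refine ⟨(hmem 2).mpr ⟨by omega, by omega, h2⟩, fun b hb => ?_⟩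
    have := bound 2 (by
      intro jn hjn; interval_cases jn
      · exact h0f
      · exact h1f) b hb
    omega
  have h2f : pvHit 2 s = false := Bool.eq_false_iff.mpr h2
  by_cases h3 : pvHit 3 s = true
  · rw [if_neg h0, if_neg h1, if_neg h2, if_pos h3, List.min?_eq_some_iff]
    refine ⟨(hmem 3).mpr ⟨by omega, by omega, h3⟩, fun b hb => ?_⟩
    have := bound 3 (by
      intro jn hjn; interval_cases jn
      · exact h0f
      · exact h1f
      · exact h2f) b hb
    omega
  have h3f : pvHit 3 s = false := Bool.eq_false_iff.mpr h3
  by_cases h4 : pvHit 4 s = true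
  · rw [if_neg h0, if_neg h1, if_neg h2, if_neg h3, if_pos h4, List.min?_eq_some_iff]
    refine ⟨(hmem 4).mpr ⟨by omega, by omega, h4⟩, fun b hb => ?_⟩
    have := bound 4 (by
      intro jn hjn; interval_cases jn
      · exact h0f
      · exact h1f
      · exact h2f
      · exact h3f) b hb
    omega
  have h4f : pvHit 4 s = false := Bool.eq_false_iff.mpr h4
  by_cases h5 : pvHit 5 s = true
  · rw [if_neg h0, if_neg h1, if_neg h2, if_neg h3, if_neg h4, if_pos h5, List.min?_eq_some_iff]
    refine ⟨(hmem 5).mpr ⟨by omega, by omega, h5⟩, fun b hb => ?_⟩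
    have := bound 5 (by
      intro jn hjn; interval_cases jn
      · exact h0f
      · exact h1f
      · exact h2f
      · exact h3f
      · exact h4f) b hb
    omega
  have h5f : pvHit 5 s = false := Bool.eq_false_iff.mpr h5
  by_cases h6 : pvHit 6 s = true
  · rw [if_neg h0, if_neg h1, if_neg h2, if_neg h3, if_neg h4, if_neg h5, if_pos h6,
      List.min?_eq_some_iff]
    refine ⟨(hmem 6).mpr ⟨by omega, by omega, h6⟩, fun b hb => ?_⟩
    have := bound 6 (by
      intro jn hjn; interval_cases jn
      · exact h0f
      · exact h1f
      · exact h2f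
      · exact h3f
      · exact h4f
      · exact h5f) b hb
    omega
  have h6f : pvHit 6 s = false := Bool.eq_false_iff.mpr h6
  · rw [if_neg h0, if_neg h1, if_neg h2, if_neg h3, if_neg h4, if_neg h5, if_neg h6,
      List.min?_eq_none_iff]
    apply List.eq_nil_iff_forall_not_mem.mpr
    intro j hj
    obtain ⟨hj0, hj7, hjh⟩ := (hmem j).mp hj
    have hjn : j.toNat < 7 := by omega
    set jn := j.toNat with hjdef
    interval_cases jn
    · simp [h0f] at hjh
    · simp [h1f] at hjh
    · simp [h2f] at hjh
    · simp [h3f] at hjh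
    · simp [h4f] at hjh
    · simp [h5f] at hjh
    · simp [h6f] at hjh

lemma pv_scan_firstHit (s : String) :
    pvScanB s (PySem.Str.len s) = pvFirstHit s := by
  rw [pv_scan_eq, pv_fold_min, pv_min_collected]

lemma pv_A_firstHit (t : String) :
    map_to_kill_chain_stage_py t =
      if t = "" then none
      else (pvFirstHit (PySem.Str.lower t)).map (fun p => PySem.List.pyGetD pvStageNames p "") := by
  by_cases h : t = ""
  · simp [map_to_kill_chain_stage_py, h]
  · rw [map_to_kill_chain_stage_py, if_neg h, if_neg h, pvFirstHit]
    simp only [pvHit, pvRow]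
    split_ifs <;> rfl

-- ===== VERDICT (by name: the statement is the Claim_ definition above) =====
theorem map_to_kill_chain_stage_py_spec : Claim_equal_map_to_kill_chain_stage_py := by
  intro t _
  unfold Spec_map_to_kill_chain_stage_py
  rw [pv_A_firstHit, map_to_kill_chain_stage_py_alt]
  by_cases h : t = ""
  · simp [h]
  · rw [if_neg h, if_neg h]
    simp only
    rw [pv_scan_firstHit]
    cases pvFirstHit (PySem.Str.lower t) <;> rfl
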